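-- pv_equiv track=rewrite | github.com/avral1810/HalmaAI | Agent.py | isWhiteWinner
-- ===== SOURCE A (Python) =====
-- def isWhiteWinner(currentBoard):
--
-- 	winner = 0
-- 	i = 0
-- 	while i < 5:
-- 		if i == 0:
-- 			j = 0
-- 			while j < 5:
--
-- 				if currentBoard[i][j] == 0:
-- 					winner = 0
-- 					return 0
-- 				elif currentBoard[i][j] == 1:
-- 					winner = 1
-- 				j += 1
-- 		else:
-- 			j = 0
-- 			while j < 6 - i:
-- 				if currentBoard[i][j] == 0:
-- 					winner = 0
-- 					return 0
-- 				elif currentBoard[i][j] == 1: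
-- 					winner = 1
-- 				j += 1
-- 		i += 1
--
-- 	return winner
-- ===== SOURCE B (Python) =====
-- def isWhiteWinner(currentBoard):
--     coords = [(0, j) for j in range(5)] + [(i, j) for i in range(1, 5) for j in range(6 - i)]
--     if any(currentBoard[i][j] == 0 for (i, j) in coords):
--         return 0
--     return 1 if any(currentBoard[i][j] == 1 for (i, j) in coords) else 0
-- ===== Notes on version B (the rewrite author's own statement) =====
-- stated objective: simpler
-- what changed: Replaces the nested while-loops carrying a winner accumulator and in-loop early returns with a fixed coordinate table and two lazy short-circuiting any() scans (first for an empty cell, then for a white piece).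
import Mathlib
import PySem

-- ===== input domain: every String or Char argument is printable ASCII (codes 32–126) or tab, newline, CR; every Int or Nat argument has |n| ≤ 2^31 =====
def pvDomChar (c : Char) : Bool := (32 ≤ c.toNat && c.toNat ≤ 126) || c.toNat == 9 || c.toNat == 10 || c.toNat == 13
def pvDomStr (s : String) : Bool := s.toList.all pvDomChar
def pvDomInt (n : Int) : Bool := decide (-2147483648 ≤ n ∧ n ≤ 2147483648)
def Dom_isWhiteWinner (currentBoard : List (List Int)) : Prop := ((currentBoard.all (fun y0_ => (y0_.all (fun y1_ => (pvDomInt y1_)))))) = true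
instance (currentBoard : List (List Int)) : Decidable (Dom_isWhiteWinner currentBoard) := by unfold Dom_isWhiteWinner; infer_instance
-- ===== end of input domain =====

-- B replaces A's nested while-loops with a fixed coordinate table and two short-circuiting scans (simpler decomposition; same cost).

-- currentBoard[i][j] (none = IndexError)
def pvCell (board : List (List Int)) (i j : Int) : Option Int :=
  (PySem.List.pyGet? board i).bind (fun row => PySem.List.pyGet? row j)

-- ===== PORT A =====
-- inner while over the j's of one row; .error r = 'return r' from inside the loop
def pvLoopJ (board : List (List Int)) (i : Int) (js : List Int) (winner : Int) :
    Except Int Int :=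
  match js with
  | [] => .ok winner
  | j :: rest =>
    match pvCell board i j with
    | none => .error 0      -- IndexError: outside Pre_
    | some v =>
      if v = 0 then .error 0
      else pvLoopJ board i rest (if v = 1 then 1 else winner)

-- outer while over the i's
def pvLoopI (board : List (List Int)) (is : List Int) (winner : Int) : Int :=
  match is with
  | [] => winner
  | i :: rest =>
    let js := if i = 0 then PySem.List.pyRange 0 5 1 else PySem.List.pyRange 0 (6 - i) 1
    match pvLoopJ board i js winner with
    | .error r => r
    | .ok w => pvLoopI board rest w

def isWhiteWinner (currentBoard : List (List Int)) : Int :=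
  pvLoopI currentBoard (PySem.List.pyRange 0 5 1) 0

-- ===== PORT B =====
def pvCoords : List (Int × Int) :=
  (PySem.List.pyRange 0 5 1).map (fun j => ((0 : Int), j)) ++
  (PySem.List.pyRange 1 5 1).flatMap (fun i => (PySem.List.pyRange 0 (6 - i) 1).map (fun j => (i, j)))

-- lazy 'any(board[i][j] == t for (i,j) in cs)'; none = IndexError reached before a hit
def pvAnyEq (board : List (List Int)) (cs : List (Int × Int)) (t : Int) : Option Bool :=
  match cs with
  | [] => some false
  | c :: rest =>
    match pvCell board c.1 c.2 with
    | none => none          -- IndexError: outside Pre_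
    | some v => if v = t then some true else pvAnyEq board rest t

def isWhiteWinner_alt (currentBoard : List (List Int)) : Int :=
  match pvAnyEq currentBoard pvCoords 0 with
  | none => 0               -- IndexError: outside Pre_
  | some true => 0
  | some false =>
    match pvAnyEq currentBoard pvCoords 1 with
    | none => 0             -- unreachable: the first scan visited every coordinate
    | some true => 1
    | some false => 0

-- ===== PRECONDITION & SPEC =====
-- Pre_ = exactly the inputs where Python A returns (no IndexError): every region coordinate
-- scanned before the first empty (0) cell is in range.
def Pre_isWhiteWinner (currentBoard : List (List Int)) : Prop :=
  ∀ c ∈ pvCoords.takeWhile (fun c => !(pvCell currentBoard c.1 c.2 == some 0)),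
    pvCell currentBoard c.1 c.2 ≠ none
instance (currentBoard : List (List Int)) : Decidable (Pre_isWhiteWinner currentBoard) := by
  unfold Pre_isWhiteWinner; infer_instance

def pvWitness_isWhiteWinner : List (List Int) :=
  [[1,1,1,1,1],[1,1,1,1,1],[1,1,1,1],[1,1,1],[1,1]]

def Spec_isWhiteWinner (currentBoard : List (List Int)) (out : Int) : Prop := out = isWhiteWinner_alt currentBoard
instance (currentBoard : List (List Int)) (out : Int) : Decidable (Spec_isWhiteWinner currentBoard out) := by unfold Spec_isWhiteWinner; infer_instance

-- ===== CLAIM (what is proved, stated in full; the proofs are below) =====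
def Claim_equal_isWhiteWinner : Prop := ∀ (currentBoard : List (List Int)), Dom_isWhiteWinner currentBoard → Pre_isWhiteWinner currentBoard → Spec_isWhiteWinner currentBoard (isWhiteWinner currentBoard)

-- ===== LEMMAS AND PROOFS =====

-- single combined scan over a coordinate list (characterises A's control flow)
def pvScan (board : List (List Int)) (cs : List (Int × Int)) (w : Int) : Except Int Int :=
  match cs with
  | [] => .ok w
  | c :: rest =>
    match pvCell board c.1 c.2 with
    | none => .error 0
    | some v =>
      if v = 0 then .error 0
      else pvScan board rest (if v = 1 then 1 else w)

-- B's shape with a generalized final fallback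
def pvAltW (board : List (List Int)) (cs : List (Int × Int)) (w : Int) : Int :=
  match pvAnyEq board cs 0 with
  | none => 0
  | some true => 0
  | some false =>
    match pvAnyEq board cs 1 with
    | none => 0
    | some true => 1
    | some false => w

-- the per-list precondition
def pvOk (board : List (List Int)) (cs : List (Int × Int)) : Prop :=
  ∀ c ∈ cs.takeWhile (fun c => !(pvCell board c.1 c.2 == some 0)),
    pvCell board c.1 c.2 ≠ none

theorem pvLoopJ_eq_scan (board : List (List Int)) (i : Int) (js : List Int) (w : Int) :
    pvLoopJ board i js w = pvScan board (js.map (fun j => (i, j))) w := by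
  induction js generalizing w with
  | nil => rfl
  | cons j rest ih =>
    simp only [pvLoopJ, pvScan, List.map]
    cases pvCell board i j with
    | none => rfl
    | some v =>
      by_cases h0 : v = 0 <;> simp [h0, ih]

theorem pvScan_append (board : List (List Int)) (l1 l2 : List (Int × Int)) (w : Int) :
    pvScan board (l1 ++ l2) w =
      match pvScan board l1 w with
      | .error r => .error r
      | .ok w' => pvScan board l2 w' := by
  induction l1 generalizing w with
  | nil => rfl
  | cons c rest ih =>
    simp only [pvScan, List.cons_append]
    cases pvCell board c.1 c.2 with
    | none => rfl
    | some v =>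
      by_cases h0 : v = 0 <;> simp [h0, ih]

def pvRowCoords (i : Int) : List (Int × Int) :=
  (if i = 0 then PySem.List.pyRange 0 5 1 else PySem.List.pyRange 0 (6 - i) 1).map
    (fun j => (i, j))

theorem pvLoopI_eq_scan (board : List (List Int)) (is : List Int) (w : Int) :
    pvLoopI board is w =
      match pvScan board (is.flatMap pvRowCoords) w with
      | .error r => r
      | .ok w' => w' := by
  induction is generalizing w with
  | nil => rfl
  | cons i rest ih =>
    simp only [pvLoopI, List.flatMap_cons, pvScan_append]
    rcases h : pvScan board (pvRowCoords i) w with r | w' <;>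
      rw [pvLoopJ_eq_scan,
        show List.map (fun j => (i, j))
            (if i = 0 then PySem.List.pyRange 0 5 1 else PySem.List.pyRange 0 (6 - i) 1) =
          pvRowCoords i from rfl, h]
    simp [ih]

theorem pvA_eq_scan (board : List (List Int)) :
    isWhiteWinner board =
      match pvScan board pvCoords 0 with
      | .error r => r
      | .ok w => w := by
  show pvLoopI board (PySem.List.pyRange 0 5 1) 0 = _
  rw [pvLoopI_eq_scan]
  have hC : (PySem.List.pyRange 0 5 1).flatMap pvRowCoords = pvCoords := by decide
  rw [hC]

-- a zero-free fully scanned region has every cell in range, so the second scan cannot raise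
theorem pvAnyEq_one_ne_none (board : List (List Int)) (cs : List (Int × Int))
    (hz : pvAnyEq board cs 0 = some false) : pvAnyEq board cs 1 ≠ none := by
  induction cs with
  | nil => simp [pvAnyEq]
  | cons c rest ih =>
    simp only [pvAnyEq] at hz ⊢
    cases hcell : pvCell board c.1 c.2 with
    | none => simp [hcell] at hz
    | some v =>
      simp only [hcell] at hz ⊢
      by_cases h0 : v = 0
      · simp [h0] at hz
      · simp only [if_neg h0] at hz
        by_cases h1 : v = 1
        · simp [h1]
        · simpa [h1] using ih hz

theorem pvScan_eq_alt (board : List (List Int)) (cs : List (Int × Int)) (w : Int)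
    (hok : pvOk board cs) :
    (match pvScan board cs w with
     | .error r => r
     | .ok w' => w') = pvAltW board cs w := by
  induction cs generalizing w with
  | nil => rfl
  | cons c rest ih =>
    rcases hcell : pvCell board c.1 c.2 with _ | v
    · exfalso
      apply hok c _ hcell
      simp [List.takeWhile, hcell]
    · by_cases h0 : v = 0
      · simp [pvScan, pvAltW, pvAnyEq, hcell, h0]
      · have hvb : (v == (0:Int)) = false := by simp [h0]
        have hok' : pvOk board rest := by
          intro d hd hdn
          apply hok d _ hdn
          simp [List.takeWhile, hcell, hvb, hd]
        have ihw := ih (if v = 1 then 1 else w) hok'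
        simp only [pvScan, pvAltW, pvAnyEq, hcell, if_neg h0] at *
        by_cases h1 : v = 1
        · subst h1
          rw [ihw]
          cases hz : pvAnyEq board rest 0 with
          | none => simp
          | some b =>
            cases b
            · have hne := pvAnyEq_one_ne_none board rest hz
              cases ho : pvAnyEq board rest 1 with
              | none => exact absurd ho hne
              | some b' => cases b' <;> simp
            · simp
        · simp only [if_neg h1] at *
          rw [ihw]

-- ===== VERDICT (by name: the statement is the Claim_ definition above) =====
theorem isWhiteWinner_spec : Claim_equal_isWhiteWinner := by
  intro board _ hpre
  show isWhiteWinner board = isWhiteWinner_alt board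
  rw [pvA_eq_scan, pvScan_eq_alt board pvCoords 0 hpre]
  rfl
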